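-- pv_equiv track=rewrite | github.com/Spruked/KayGee_1.0 | ai_companion/src/reasoning/analogy.py | find_isomorphism
-- ===== SOURCE A (Python) =====
-- from typing import Dict, List, Any, Optional
--
-- def find_isomorphism(source_triples: List, target_triples: List):
--     """Greedy mapping between structures"""
--     mapping = {}
--
--     for s_triple in source_triples:
--         for t_triple in target_triples:
--             if s_triple[1] == t_triple[1]:  # Same predicate
--                 mapping[s_triple[0]] = t_triple[0]
--                 mapping[s_triple[2]] = t_triple[2]
--
--     return mapping
-- ===== SOURCE B (Python) =====
-- def find_isomorphism(source_triples, target_triples):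
--     """Greedy mapping between structures: index targets by predicate (last wins), one pass over sources."""
--     by_pred = {}
--     for t in target_triples:
--         by_pred[t[1]] = t
--     mapping = {}
--     for s in source_triples:
--         t = by_pred.get(s[1])
--         if t is not None:
--             mapping[s[0]] = t[0]
--             mapping[s[2]] = t[2]
--     return mapping
-- ===== Notes on version B (the rewrite author's own statement) =====
-- stated objective: faster
-- what changed: Replaced A's nested scan of every source triple against every target triple with a dict indexing targets by predicate (last occurrence wins) built once, then a single lookup per source triple.
import Mathlib
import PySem

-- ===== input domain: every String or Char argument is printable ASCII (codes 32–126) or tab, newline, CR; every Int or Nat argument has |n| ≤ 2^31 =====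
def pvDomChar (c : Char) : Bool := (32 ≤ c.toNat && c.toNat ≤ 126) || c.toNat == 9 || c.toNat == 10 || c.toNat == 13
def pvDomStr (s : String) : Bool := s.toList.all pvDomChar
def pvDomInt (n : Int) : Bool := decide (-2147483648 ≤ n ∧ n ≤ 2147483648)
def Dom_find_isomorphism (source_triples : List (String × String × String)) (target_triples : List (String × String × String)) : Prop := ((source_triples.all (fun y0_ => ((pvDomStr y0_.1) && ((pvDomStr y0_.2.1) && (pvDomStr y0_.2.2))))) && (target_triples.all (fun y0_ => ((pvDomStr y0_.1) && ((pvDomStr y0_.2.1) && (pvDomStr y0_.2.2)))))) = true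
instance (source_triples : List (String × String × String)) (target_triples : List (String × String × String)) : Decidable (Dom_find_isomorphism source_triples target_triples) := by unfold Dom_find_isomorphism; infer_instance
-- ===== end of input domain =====

-- B replaces A's nested scan (every source triple against every target triple) by a predicate → last-target
-- index built once, then a single lookup per source triple: O(n*m) → O(n+m). Return values are identical.

-- ===== PORT A =====
-- A: for each source triple, scan ALL target triples; every predicate match overwrites the two mapping entries.
def find_isomorphism (source_triples : List (String × String × String)) (target_triples : List (String × String × String)) : List (String × String) :=
  (source_triples.foldl (fun mapping s_triple =>
      target_triples.foldl (fun mapping t_triple =>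
        if s_triple.2.1 == t_triple.2.1 then
          (mapping.insert s_triple.1 t_triple.1).insert s_triple.2.2 t_triple.2.2
        else mapping) mapping)
    (PySem.Dict.empty : PySem.Dict String String)).items

-- ===== PORT B =====
-- B: index target triples by predicate (last occurrence wins), then one pass over the source triples.
def find_isomorphism_alt (source_triples : List (String × String × String)) (target_triples : List (String × String × String)) : List (String × String) :=
  let by_pred : PySem.Dict String (String × String × String) :=
    target_triples.foldl (fun d t => d.insert t.2.1 t) PySem.Dict.empty
  (source_triples.foldl (fun mapping s =>
      match by_pred.get? s.2.1 with
      | some t => (mapping.insert s.1 t.1).insert s.2.2 t.2.2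
      | none => mapping)
    (PySem.Dict.empty : PySem.Dict String String)).items

-- ===== PRECONDITION & SPEC =====
def Spec_find_isomorphism (source_triples : List (String × String × String)) (target_triples : List (String × String × String)) (out : List (String × String)) : Prop := out = find_isomorphism_alt source_triples target_triples
instance (source_triples : List (String × String × String)) (target_triples : List (String × String × String)) (out : List (String × String)) : Decidable (Spec_find_isomorphism source_triples target_triples out) := by unfold Spec_find_isomorphism; infer_instance

-- ===== CLAIM (what is proved, stated in full; the proofs are below) =====
def Claim_equal_find_isomorphism : Prop := ∀ (source_triples : List (String × String × String)) (target_triples : List (String × String × String)), Dom_find_isomorphism source_triples target_triples → Spec_find_isomorphism source_triples target_triples (find_isomorphism source_triples target_triples)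

-- ===== LEMMAS AND PROOFS =====

-- Dict facts specific to the two inserts the programs share (the library has insert_insert_self;
-- these add: `contains` survives an insert at another key, and two in-place inserts commute).
theorem pv_contains_insert_of_ne {ν : Type} (d : PySem.Dict String ν) (k k' : String) (v : ν) (h : k' ≠ k) :
    (d.insert k' v).contains k = d.contains k := by
  simp only [PySem.Dict.insert, PySem.Dict.contains]
  split
  · rw [List.any_map]
    refine PySem.List.any_congr_mem ?_
    intro p _
    simp only [Function.comp]
    split
    · next hk => simp_all
    · rfl
  · simp [h]

theorem pv_contains_insert_self {ν : Type} (d : PySem.Dict String ν) (k : String) (v : ν) :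
    (d.insert k v).contains k = true := by
  have h : ((d.insert k v).get? k).isSome = true := by
    rw [PySem.Dict.get?_insert_self]; rfl
  simpa [PySem.Dict.contains, PySem.Dict.get?, List.any_beq'] using h

theorem pv_insert_comm_of_contains {ν : Type} (d : PySem.Dict String ν) (k k' : String) (b c : ν)
    (hk : d.contains k = true) (hne : k' ≠ k) :
    (d.insert k' b).insert k c = (d.insert k c).insert k' b := by
  have h1 : (d.insert k' b).contains k = true := by rw [pv_contains_insert_of_ne _ _ _ _ hne]; exact hk
  have h2 : (d.insert k c).contains k' = d.contains k' := pv_contains_insert_of_ne _ _ _ _ (Ne.symm hne)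
  by_cases hk' : d.contains k' = true
  · have e1 : d.insert k' b = ⟨d.items.map (fun p => if p.1 == k' then (k', b) else p)⟩ := by
      simp [PySem.Dict.insert, hk']
    have e2 : d.insert k c = ⟨d.items.map (fun p => if p.1 == k then (k, c) else p)⟩ := by
      simp [PySem.Dict.insert, hk]
    rw [e1] at h1
    rw [e2, hk'] at h2
    rw [e1, e2]
    simp only [PySem.Dict.insert, h1, h2, if_true]
    simp only [List.map_map]
    congr 1
    refine List.map_congr_left ?_
    intro p _
    simp only [Function.comp]
    by_cases e1 : p.1 = k <;> by_cases e2 : p.1 = k' <;> simp_all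
  · have e1 : d.insert k' b = ⟨d.items ++ [(k', b)]⟩ := by
      simp [PySem.Dict.insert, hk']
    have e2 : d.insert k c = ⟨d.items.map (fun p => if p.1 == k then (k, c) else p)⟩ := by
      simp [PySem.Dict.insert, hk]
    rw [e1] at h1
    have h2' : (PySem.Dict.mk (d.items.map (fun p => if p.1 == k then (k, c) else p))).contains k' = false := by
      rw [← e2]; rw [h2]; simpa using hk'
    rw [e1, e2]
    simp only [PySem.Dict.insert, h1, h2', if_true, Bool.false_eq_true, if_false]
    congr 1
    simp only [List.map_append, List.map_cons, List.map_nil]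
    simp [hne]

-- The double insert both programs perform for one matched pair of triples.
def pvIns2 (m : PySem.Dict String String) (s t : String × String × String) : PySem.Dict String String :=
  (m.insert s.1 t.1).insert s.2.2 t.2.2

-- A later match fully overwrites an earlier one.
theorem pvIns2_collapse (m : PySem.Dict String String) (s t t' : String × String × String) :
    pvIns2 (pvIns2 m s t) s t' = pvIns2 m s t' := by
  unfold pvIns2
  by_cases h : s.1 = s.2.2
  · rw [← h]
    simp [PySem.Dict.insert_insert_self]
  · have hc : ((m.insert s.1 t.1).insert s.2.2 t.2.2).contains s.1 = true := by
      rw [pv_contains_insert_of_ne _ _ _ _ (Ne.symm h)]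
      exact pv_contains_insert_self _ _ _
    calc (((m.insert s.1 t.1).insert s.2.2 t.2.2).insert s.1 t'.1).insert s.2.2 t'.2.2
        = (((m.insert s.1 t.1).insert s.1 t'.1).insert s.2.2 t.2.2).insert s.2.2 t'.2.2 := by
          rw [pv_insert_comm_of_contains _ _ _ _ _ (pv_contains_insert_self _ _ _) (Ne.symm h)]
      _ = (m.insert s.1 t'.1).insert s.2.2 t'.2.2 := by
          rw [PySem.Dict.insert_insert_self, PySem.Dict.insert_insert_self]

-- The index built by B looks up the LAST target triple whose predicate matches.
theorem pv_get_index (ts : List (String × String × String)) (d : PySem.Dict String (String × String × String)) (p : String) :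
    (ts.foldl (fun d t => d.insert t.2.1 t) d).get? p
      = match ts.reverse.find? (fun t => t.2.1 == p) with
        | some t => some t
        | none => d.get? p := by
  induction ts generalizing d with
  | nil => simp
  | cons t ts ih =>
    simp only [List.foldl_cons, List.reverse_cons, List.find?_append]
    rw [ih]
    cases hf : ts.reverse.find? (fun t => t.2.1 == p) with
    | some t' => simp
    | none =>
      simp only [List.find?_singleton]
      by_cases h : t.2.1 = p
      · subst h; simp [PySem.Dict.get?_insert_self]
      · rw [PySem.Dict.get?_insert_of_ne _ _ (Ne.symm h)]
        simp [h]

-- A's inner scan over all targets equals one double-insert for the last matching target (or nothing).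
theorem pv_inner_scan (s : String × String × String) (ts : List (String × String × String)) (m : PySem.Dict String String) :
    ts.foldl (fun mapping t_triple =>
        if s.2.1 == t_triple.2.1 then
          (mapping.insert s.1 t_triple.1).insert s.2.2 t_triple.2.2
        else mapping) m
      = match ts.reverse.find? (fun t => t.2.1 == s.2.1) with
        | some t => pvIns2 m s t
        | none => m := by
  induction ts generalizing m with
  | nil => simp
  | cons t ts ih =>
    simp only [List.foldl_cons, List.reverse_cons, List.find?_append]
    by_cases h : s.2.1 = t.2.1
    · have hb : (s.2.1 == t.2.1) = true := by simpa using h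
      have hb' : (t.2.1 == s.2.1) = true := by simpa using (Eq.symm h)
      simp only [hb, if_true]
      rw [ih]
      cases hf : ts.reverse.find? (fun t => t.2.1 == s.2.1) with
      | some t' => simpa [pvIns2] using pvIns2_collapse m s t t'
      | none => simp [hb', pvIns2]
    · have hb : (s.2.1 == t.2.1) = false := by simpa using h
      have hb' : (t.2.1 == s.2.1) = false := by simpa using (Ne.symm h)
      simp only [hb, Bool.false_eq_true, if_false]
      rw [ih]
      simp [hb']

-- ===== VERDICT (by name: the statement is the Claim_ definition above) =====
theorem find_isomorphism_spec : Claim_equal_find_isomorphism := by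
  intro source_triples target_triples _dom
  unfold Spec_find_isomorphism find_isomorphism find_isomorphism_alt
  congr 1
  refine PySem.List.foldl_congr_mem _ _ _ _ ?_
  intro m s _
  rw [pv_inner_scan, pv_get_index]
  simp only [PySem.Dict.get?, PySem.Dict.empty, List.find?_nil, Option.map_none]
  cases hf : target_triples.reverse.find? (fun t => t.2.1 == s.2.1) <;> simp [pvIns2]
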